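-- pv_equiv track=rewrite | github.com/cmungall/ai-gene-review | genes/pombe/Epe1/Epe1-bioinformatics/05_structural_features.py | predict_secondary_structure
-- ===== SOURCE A (Python) =====
-- def predict_secondary_structure(sequence):
--     """
--     Simple secondary structure prediction based on amino acid propensities.
--     This is a simplified method - ideally would use more sophisticated tools.
--     """
--     # Chou-Fasman propensities (simplified)
--     helix_formers = set("AELMQK")
--     helix_breakers = set("PGNDS")
--     sheet_formers = set("VFIYW")
--     sheet_breakers = set("PEGDK")
--
--     structure = []
--     window_size = 5
--
--     for i in range(len(sequence)):
--         window_start = max(0, i - window_size // 2)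
--         window_end = min(len(sequence), i + window_size // 2 + 1)
--         window = sequence[window_start:window_end]
--
--         helix_score = sum(1 for aa in window if aa in helix_formers) - sum(1 for aa in window if aa in helix_breakers)
--         sheet_score = sum(1 for aa in window if aa in sheet_formers) - sum(1 for aa in window if aa in sheet_breakers)
--
--         if helix_score > sheet_score and helix_score > 0:
--             structure.append('H')  # Helix
--         elif sheet_score > 0:
--             structure.append('E')  # Sheet
--         else:
--             structure.append('C')  # Coil
--
--     return ''.join(structure)
-- ===== SOURCE B (Python) =====
-- def predict_secondary_structure(sequence):
--     """Prefix-sum re-implementation: per-residue contributions are accumulated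
--     once, each window score is then an O(1) difference of prefix sums."""
--     helix_formers = set("AELMQK")
--     helix_breakers = set("PGNDS")
--     sheet_formers = set("VFIYW")
--     sheet_breakers = set("PEGDK")
--
--     n = len(sequence)
--     hp = [0] * (n + 1)
--     sp = [0] * (n + 1)
--     for i, aa in enumerate(sequence):
--         hp[i + 1] = hp[i] + (aa in helix_formers) - (aa in helix_breakers)
--         sp[i + 1] = sp[i] + (aa in sheet_formers) - (aa in sheet_breakers)
--
--     out = []
--     for i in range(n):
--         a = i - 2 if i >= 2 else 0
--         b = i + 3 if i + 3 <= n else n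
--         helix_score = hp[b] - hp[a]
--         sheet_score = sp[b] - sp[a]
--         if helix_score > sheet_score and helix_score > 0:
--             out.append('H')
--         elif sheet_score > 0:
--             out.append('E')
--         else:
--             out.append('C')
--     return ''.join(out)
-- ===== Notes on version B (the rewrite author's own statement) =====
-- stated objective: faster
-- what changed: Replaces the per-position window rescans (slice + four membership sums per residue) with two prefix-sum arrays built in one pass, so each window score is an O(1) difference of prefix sums.
import Mathlib
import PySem

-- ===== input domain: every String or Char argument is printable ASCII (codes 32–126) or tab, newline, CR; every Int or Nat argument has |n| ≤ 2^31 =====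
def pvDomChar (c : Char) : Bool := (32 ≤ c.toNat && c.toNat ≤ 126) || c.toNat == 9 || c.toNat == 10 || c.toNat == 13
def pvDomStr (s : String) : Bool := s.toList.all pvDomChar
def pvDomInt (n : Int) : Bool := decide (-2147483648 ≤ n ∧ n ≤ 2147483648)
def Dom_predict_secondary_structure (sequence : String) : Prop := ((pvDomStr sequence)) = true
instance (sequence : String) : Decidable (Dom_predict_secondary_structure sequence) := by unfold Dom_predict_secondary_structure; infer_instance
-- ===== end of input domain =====

-- B replaces A's per-position window rescans by two prefix-sum arrays built in one
-- pass, so each window score is an O(1) difference (objective: faster, constant factor).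

-- Chou-Fasman propensity sets (shared data constants; both Pythons define the same sets)
def pvHelixFormers : List Char := "AELMQK".toList
def pvHelixBreakers : List Char := "PGNDS".toList
def pvSheetFormers : List Char := "VFIYW".toList
def pvSheetBreakers : List Char := "PEGDK".toList

-- ===== PORT A =====
def predict_secondary_structure (sequence : String) : String :=
  let s := sequence.toList
  let n : Int := (s.length : Int)
  let windowSize : Int := 5
  let structureList := (PySem.List.pyRange 0 n 1).foldl (fun acc i =>
    let ws := max 0 (i - PySem.Int.floordiv windowSize 2)
    let we := min n (i + PySem.Int.floordiv windowSize 2 + 1)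
    let window := PySem.List.slice s (some ws) (some we)
    let helix_score : Int :=
      (window.countP (fun aa => pvHelixFormers.contains aa) : Int)
        - (window.countP (fun aa => pvHelixBreakers.contains aa) : Int)
    let sheet_score : Int :=
      (window.countP (fun aa => pvSheetFormers.contains aa) : Int)
        - (window.countP (fun aa => pvSheetBreakers.contains aa) : Int)
    acc ++ [if helix_score > sheet_score ∧ helix_score > 0 then 'H'
            else if sheet_score > 0 then 'E' else 'C']) ([] : List Char)
  String.ofList structureList

-- ===== PORT B =====
-- per-residue contribution: +1 former, -1 breaker (a residue may be both for the two tables)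
def pvContrib (formers breakers : List Char) (aa : Char) : Int :=
  (if formers.contains aa then 1 else 0) - (if breakers.contains aa then 1 else 0)

def predict_secondary_structure_alt (sequence : String) : String :=
  let s := sequence.toList
  let n : Int := (s.length : Int)
  -- hp/sp are the prefix-sum arrays of Source B's first loop (hp[i+1] = hp[i] + contrib)
  let hp := List.scanl (fun acc aa => acc + pvContrib pvHelixFormers pvHelixBreakers aa) 0 s
  let sp := List.scanl (fun acc aa => acc + pvContrib pvSheetFormers pvSheetBreakers aa) 0 s
  let out := (PySem.List.pyRange 0 n 1).map (fun i =>
    let a := if 2 ≤ i then i - 2 else 0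
    let b := if i + 3 ≤ n then i + 3 else n
    let helix_score := hp.getD b.toNat 0 - hp.getD a.toNat 0
    let sheet_score := sp.getD b.toNat 0 - sp.getD a.toNat 0
    if helix_score > sheet_score ∧ helix_score > 0 then 'H'
    else if sheet_score > 0 then 'E' else 'C')
  String.ofList out

-- ===== PRECONDITION & SPEC =====
def Spec_predict_secondary_structure (sequence : String) (out : String) : Prop := out = predict_secondary_structure_alt sequence
instance (sequence : String) (out : String) : Decidable (Spec_predict_secondary_structure sequence out) := by unfold Spec_predict_secondary_structure; infer_instance

-- ===== CLAIM (what is proved, stated in full; the proofs are below) =====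
def Claim_equal_predict_secondary_structure : Prop := ∀ (sequence : String), Dom_predict_secondary_structure sequence → Spec_predict_secondary_structure sequence (predict_secondary_structure sequence)

-- ===== LEMMAS AND PROOFS =====

-- count of formers minus count of breakers = sum of per-residue contributions
lemma pvCountP_sub (formers breakers l : List Char) :
    ((l.countP (fun aa => formers.contains aa) : Int))
      - (l.countP (fun aa => breakers.contains aa) : Int)
    = (l.map (pvContrib formers breakers)).sum := by
  induction l with
  | nil => simp
  | cons c l ih =>
    simp only [List.countP_cons, List.map_cons, List.sum_cons, ← ih, pvContrib]
    push_cast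
    split_ifs <;> ring

-- the k-th entry of the scanl prefix-sum array is init + sum of the first k contributions
lemma pvScanl_getD (f : Char → Int) (l : List Char) :
    ∀ (k : Nat) (a : Int), k ≤ l.length →
      (List.scanl (fun acc c => acc + f c) a l).getD k 0 = a + ((l.take k).map f).sum := by
  induction l with
  | nil =>
    intro k a hk
    have : k = 0 := Nat.le_zero.mp hk
    subst this; simp
  | cons c l ih =>
    intro k a hk
    cases k with
    | zero => simp [List.scanl_cons]
    | succ k =>
      rw [List.scanl_cons, List.getD_cons_succ, List.take_succ_cons, List.map_cons,
        List.sum_cons]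
      rw [ih k (a + f c) (by simpa using hk)]
      ring

-- a window sum is a difference of two prefix sums
lemma pvSum_take_sub (f : Char → Int) (l : List Char) (a b : Nat) (hab : a ≤ b) :
    ((List.take (b - a) (List.drop a l)).map f).sum
      = ((l.take b).map f).sum - ((l.take a).map f).sum := by
  have h1 : List.take (b - a) (List.drop a l) = (l.take b).drop a := by
    rw [List.drop_take]
  have h2 : l.take b = l.take a ++ (l.take b).drop a := by
    conv_lhs => rw [← List.take_append_drop a (l.take b)]
    rw [List.take_take, min_eq_left hab]
  rw [h1]
  conv_rhs => rw [h2]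
  simp [List.map_append]

-- A's windowed score equals B's prefix-sum difference, for every index in range
lemma pvScore_eq (formers breakers s : List Char) (i : Int)
    (h0 : 0 ≤ i) (hn : i < (s.length : Int)) :
    ((PySem.List.slice s (some (max 0 (i - 2))) (some (min (s.length : Int) (i + 3)))).countP
        (fun aa => formers.contains aa) : Int)
      - ((PySem.List.slice s (some (max 0 (i - 2))) (some (min (s.length : Int) (i + 3)))).countP
        (fun aa => breakers.contains aa) : Int)
    = (List.scanl (fun acc aa => acc + pvContrib formers breakers aa) 0 s).getD
        (min (s.length : Int) (i + 3)).toNat 0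
      - (List.scanl (fun acc aa => acc + pvContrib formers breakers aa) 0 s).getD
        (max 0 (i - 2)).toNat 0 := by
  set ws : Int := max 0 (i - 2) with hws
  set we : Int := min (s.length : Int) (i + 3) with hwe
  have hws0 : 0 ≤ ws := le_max_left _ _
  have hwsn : ws ≤ (s.length : Int) := by omega
  have hwe0 : 0 ≤ we := by omega
  have hwen : we ≤ (s.length : Int) := min_le_left _ _
  have hwswe : ws ≤ we := by omega
  have hcw : PySem.List.clampIdx s.length ws = ws.toNat := by
    simp only [PySem.List.clampIdx]; split_ifs <;> omega
  have hce : PySem.List.clampIdx s.length we = we.toNat := by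
    simp only [PySem.List.clampIdx]; split_ifs <;> omega
  have hslice : PySem.List.slice s (some ws) (some we)
      = List.take (we.toNat - ws.toNat) (List.drop ws.toNat s) := by
    simp [PySem.List.slice, hcw, hce]
  rw [hslice, pvCountP_sub,
    pvSum_take_sub _ _ _ _ (by omega),
    pvScanl_getD _ _ _ _ (by omega),
    pvScanl_getD _ _ _ _ (by omega)]
  ring

-- ===== VERDICT (by name: the statement is the Claim_ definition above) =====
theorem predict_secondary_structure_spec : Claim_equal_predict_secondary_structure := by
  intro sequence _
  unfold Spec_predict_secondary_structure predict_secondary_structure predict_secondary_structure_alt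
  simp only []
  rw [PySem.List.foldl_append_singleton_eq_map, List.nil_append]
  congr 1
  apply List.map_congr_left
  intro i hi
  rw [PySem.List.mem_pyRange_one] at hi
  obtain ⟨h0, hn⟩ := hi
  have hfd : PySem.Int.floordiv 5 2 = 2 := by decide
  have ha : (if 2 ≤ i then i - 2 else 0) = max 0 (i - 2) := by split_ifs <;> omega
  have hb : (if i + 3 ≤ (sequence.toList.length : Int) then i + 3 else (sequence.toList.length : Int))
      = min (sequence.toList.length : Int) (i + 3) := by split_ifs <;> omega
  have hc : i + 2 + 1 = i + 3 := by ring
  simp only [hfd, hc, ha, hb]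
  rw [pvScore_eq pvHelixFormers pvHelixBreakers _ i h0 hn,
    pvScore_eq pvSheetFormers pvSheetBreakers _ i h0 hn]
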